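-- pv_equiv track=rewrite | github.com/cry999/AtCoder | beginner/060/B.py | choose_integers
-- ===== SOURCE A (Python) =====
-- def choose_integers(A: int, B: int, C: int) -> bool:
--     n = A
--     for _ in range(B):
--         n %= B
--         if n == C:
--             return True
--         n = (n + A)
--     return False
-- ===== SOURCE B (Python) =====
-- def _gcd(a: int, b: int) -> int:
--     while b:
--         a, b = b, a % b
--     return abs(a)
--
-- def choose_integers(A: int, B: int, C: int) -> bool:
--     # The loop in A checks k*A mod B for k = 1..B; that set is exactly the
--     # multiples of gcd(A, B) in [0, B).
--     return B > 0 and 0 <= C < B and C % _gcd(A, B) == 0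
-- ===== Notes on version B (the rewrite author's own statement) =====
-- stated objective: faster
-- what changed: Replaced the O(B) loop that checks k*A mod B for k=1..B by the closed-form test 'B>0 and 0<=C<B and C % gcd(A,B) == 0' using a hand-written Euclid gcd.
import Mathlib
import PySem

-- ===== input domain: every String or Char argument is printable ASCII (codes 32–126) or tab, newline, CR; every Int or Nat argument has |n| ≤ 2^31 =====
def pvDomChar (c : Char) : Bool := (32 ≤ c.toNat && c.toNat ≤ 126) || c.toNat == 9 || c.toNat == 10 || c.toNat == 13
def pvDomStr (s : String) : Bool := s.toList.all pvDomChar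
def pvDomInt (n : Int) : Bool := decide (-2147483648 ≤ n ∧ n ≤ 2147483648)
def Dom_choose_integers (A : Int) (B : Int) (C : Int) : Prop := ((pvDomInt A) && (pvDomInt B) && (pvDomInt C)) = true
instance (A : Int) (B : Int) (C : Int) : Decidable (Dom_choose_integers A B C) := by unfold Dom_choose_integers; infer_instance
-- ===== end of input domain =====

-- B replaces A's O(B) scan of k*A mod B (k = 1..B) by the closed-form test
-- B > 0 ∧ 0 ≤ C < B ∧ C % gcd(A,B) == 0 with a hand-written Euclid gcd (objective: faster).

-- ===== PORT A =====
-- the for-loop of A: k remaining iterations, n the loop variable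
def chooseLoop (A B C : Int) : Int → Nat → Bool
  | _, 0 => false
  | n, k + 1 =>
    let n' := PySem.Int.mod n B
    if n' = C then true else chooseLoop A B C (n' + A) k

def choose_integers (A : Int) (B : Int) (C : Int) : Bool :=
  chooseLoop A B C A B.toNat

-- ===== PORT B =====
-- termination fact for the Euclid loop (cited by gcdI's decreasing_by)
theorem pvModNatAbsLt (a b : Int) (hb : b ≠ 0) :
    (PySem.Int.mod a b).natAbs < b.natAbs := by
  rcases lt_or_gt_of_ne hb with h | h
  · have h1 := PySem.Int.mod_neg_bounds a h
    omega
  · have h1 := PySem.Int.mod_nonneg a h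
    have h2 := PySem.Int.mod_lt a h
    omega

-- transliteration of Source B's _gcd (while b: a, b = b, a % b; return abs(a))
def gcdI (a b : Int) : Int :=
  if hb : b = 0 then |a| else gcdI b (PySem.Int.mod a b)
termination_by b.natAbs
decreasing_by exact pvModNatAbsLt a b hb

def choose_integers_alt (A : Int) (B : Int) (C : Int) : Bool :=
  decide (0 < B) && decide (0 ≤ C) && decide (C < B)
    && (PySem.Int.mod C (gcdI A B) == 0)

-- ===== PRECONDITION & SPEC =====
def Spec_choose_integers (A : Int) (B : Int) (C : Int) (out : Bool) : Prop := out = choose_integers_alt A B C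
instance (A : Int) (B : Int) (C : Int) (out : Bool) : Decidable (Spec_choose_integers A B C out) := by unfold Spec_choose_integers; infer_instance

-- ===== CLAIM (what is proved, stated in full; the proofs are below) =====
def Claim_equal_choose_integers : Prop := ∀ (A : Int) (B : Int) (C : Int), Dom_choose_integers A B C → Spec_choose_integers A B C (choose_integers A B C)

-- ===== LEMMAS AND PROOFS =====

theorem gcdI_eq_gcd (a b : Int) : gcdI a b = (Int.gcd a b : Int) := by
  rw [gcdI]
  split
  · next hb => subst hb; rw [Int.gcd_zero_right, Int.abs_eq_natAbs]
  · next hb =>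
    have ih := gcdI_eq_gcd b (PySem.Int.mod a b)
    rw [ih]
    have hmod : PySem.Int.mod a b = a + b * (-(PySem.Int.floordiv a b)) := by
      have h := PySem.Int.floordiv_mul_add_mod a b
      linear_combination h
    rw [hmod, Int.gcd_add_mul_left_right, Int.gcd_comm]
termination_by b.natAbs
decreasing_by exact pvModNatAbsLt a b ‹b ≠ 0›

theorem shift_emod (n A B : Int) (j : Nat) :
    (n % B + A + (j : Int) * A) % B = (n + ((j : Nat) + 1 : Int) * A) % B := by
  have h : n % B + A + (j : Int) * A
      = (n + ((j : Nat) + 1 : Int) * A) + B * (-(n / B)) := by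
    rw [Int.emod_def]; ring
  rw [h, Int.add_mul_emod_self_left]

theorem loop_iff (A B C : Int) (hB : 0 < B) : ∀ (k : Nat) (n : Int),
    chooseLoop A B C n k = true ↔ ∃ j : Nat, j < k ∧ (n + (j : Int) * A) % B = C := by
  intro k
  induction k with
  | zero => intro n; simp [chooseLoop]
  | succ k ih =>
    intro n
    have hmodeq : PySem.Int.mod n B = n % B :=
      PySem.Int.mod_eq_emod_of_pos (a := n) (b := B) hB
    simp only [chooseLoop, hmodeq]
    by_cases hc : n % B = C
    · rw [if_pos hc]
      refine ⟨fun _ => ⟨0, by omega, by simpa using hc⟩, fun _ => rfl⟩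
    · rw [if_neg hc, ih]
      constructor
      · rintro ⟨j, hj, hje⟩
        refine ⟨j + 1, by omega, ?_⟩
        rw [← hje, shift_emod]
        push_cast
        ring_nf
      · rintro ⟨j, hj, hje⟩
        match j with
        | 0 => simp at hje; exact absurd hje hc
        | j + 1 =>
          refine ⟨j, by omega, ?_⟩
          rw [shift_emod, ← hje]
          push_cast
          ring_nf

theorem key_iff (A B C : Int) (hB : 0 < B) :
    (∃ j : Nat, j < B.toNat ∧ (A + (j : Int) * A) % B = C)
      ↔ (0 ≤ C ∧ C < B ∧ (Int.gcd A B : Int) ∣ C) := by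
  have hBne : B ≠ 0 := by omega
  constructor
  · rintro ⟨j, hj, hje⟩
    refine ⟨hje ▸ Int.emod_nonneg _ hBne, hje ▸ Int.emod_lt_of_pos _ hB, ?_⟩
    rw [← hje, Int.emod_def]
    have hA : (Int.gcd A B : Int) ∣ (A + (j : Int) * A) := by
      have h : A + (j : Int) * A = ((j : Int) + 1) * A := by ring
      rw [h]; exact (Int.gcd_dvd_left A B).mul_left _
    exact dvd_sub hA ((Int.gcd_dvd_right A B).mul_right _)
  · rintro ⟨hC0, hCB, hdvd⟩
    obtain ⟨m, hm⟩ := hdvd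
    set t : Int := m * Int.gcdA A B with ht
    have hbez := Int.gcd_eq_gcd_ab A B
    have htA : (t * A) % B = C := by
      have h : t * A = C + B * (-(m * Int.gcdB A B)) := by
        rw [hm, hbez]; ring
      rw [h, Int.add_mul_emod_self_left, Int.emod_eq_of_lt hC0 hCB]
    set k : Int := t % B with hk
    have hk0 : 0 ≤ k := Int.emod_nonneg _ hBne
    have hkB : k < B := Int.emod_lt_of_pos _ hB
    have hkA : (k * A) % B = C := by
      have h : k * A = t * A + B * (-(t / B * A)) := by
        rw [hk, Int.emod_def]; ring
      rw [h, Int.add_mul_emod_self_left, htA]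
    by_cases hkz : k = 0
    · refine ⟨B.toNat - 1, by omega, ?_⟩
      have hC : C = 0 := by rw [← hkA, hkz]; simp
      have h : A + ((B.toNat - 1 : Nat) : Int) * A = B * A := by
        have hco : ((B.toNat - 1 : Nat) : Int) = B - 1 := by omega
        rw [hco]; ring
      rw [h, hC, Int.mul_emod_right]
    · refine ⟨(k - 1).toNat, by omega, ?_⟩
      have hco : (((k - 1).toNat : Nat) : Int) = k - 1 := by omega
      have h : A + (((k - 1).toNat : Nat) : Int) * A = k * A := by rw [hco]; ring
      rw [h, hkA]

-- ===== VERDICT (by name: the statement is the Claim_ definition above) =====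
theorem choose_integers_spec : Claim_equal_choose_integers := by
  intro A B C _
  unfold Spec_choose_integers choose_integers choose_integers_alt
  by_cases hB : 0 < B
  · have hg : gcdI A B = (Int.gcd A B : Int) := gcdI_eq_gcd A B
    rw [Bool.eq_iff_iff]
    simp only [hg, Bool.and_eq_true, decide_eq_true_eq, beq_iff_eq,
      PySem.Int.mod_eq_zero_iff_dvd]
    rw [loop_iff A B C hB, key_iff A B C hB]
    tauto
  · have h0 : B.toNat = 0 := by omega
    rw [h0]
    simp [chooseLoop, hB]
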